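-- pv_equiv track=rewrite | github.com/quchuyuan/langchain | libs/partners/prompty/tests/unit_tests/fake_output_parser.py | extract_action_details
-- ===== SOURCE A (Python) =====
-- def extract_action_details(text):
--     # Split the text into lines and strip whitespace
--     lines = [line.strip() for line in text.strip().split("\n")]
--
--     # Initialize variables to hold the extracted values
--     action = None
--     action_input = None
--
--     # Iterate through the lines to find and extract the desired information
--     for line in lines:
--         if line.startswith("Action:"):
--             action = line.split(":", 1)[1].strip()
--         elif line.startswith("Action Input:"):
--             action_input = line.split(":", 1)[1].strip()
--
--     return action, action_input
-- ===== SOURCE B (Python) =====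
-- def extract_action_details(text):
--     d = {}
--     for line in text.strip().split("\n"):
--         line = line.strip()
--         if ":" in line:
--             key, value = line.split(":", 1)
--             d[key] = value.strip()
--     return d.get("Action"), d.get("Action Input")
-- ===== Notes on version B (the rewrite author's own statement) =====
-- stated objective: simpler
-- what changed: B replaces A's per-line prefix branching over two tracked variables by building a dict keyed on the first-colon split of each line in one pass and looking up 'Action' and 'Action Input' at the end.
import Mathlib
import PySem

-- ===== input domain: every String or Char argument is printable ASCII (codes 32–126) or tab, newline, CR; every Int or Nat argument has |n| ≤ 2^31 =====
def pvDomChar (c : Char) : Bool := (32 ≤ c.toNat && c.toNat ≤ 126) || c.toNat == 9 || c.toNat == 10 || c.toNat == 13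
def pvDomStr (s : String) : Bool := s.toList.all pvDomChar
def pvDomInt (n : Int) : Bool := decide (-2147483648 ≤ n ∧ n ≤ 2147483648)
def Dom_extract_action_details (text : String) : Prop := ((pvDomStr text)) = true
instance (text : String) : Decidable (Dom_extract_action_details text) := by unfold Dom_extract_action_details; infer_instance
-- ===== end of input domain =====

-- B replaces A's per-line prefix branching by building a first-colon-keyed dict in one pass
-- and looking up 'Action' / 'Action Input' at the end (objective: simpler decomposition).

-- ===== PORT A =====
-- A's loop body: state (action, action_input)
def pvAStep (st : Option (List Char) × Option (List Char)) (line : List Char) :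
    Option (List Char) × Option (List Char) :=
  if PySem.Chars.startswith line ("Action:".toList) then
    (some (PySem.Chars.strip ((PySem.Chars.splitOnMax line [':'] 1).getD 1 [])), st.2)
  else if PySem.Chars.startswith line ("Action Input:".toList) then
    (st.1, some (PySem.Chars.strip ((PySem.Chars.splitOnMax line [':'] 1).getD 1 [])))
  else st

def extract_action_details (text : String) : Option String × Option String :=
  let lines := (PySem.Chars.splitOn (PySem.Chars.strip text.toList) ['\n']).map PySem.Chars.strip
  let st := lines.foldl pvAStep (none, none)
  (st.1.map String.ofList, st.2.map String.ofList)

-- ===== PORT B =====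
-- B's loop body: strip the line; if it contains ':', split on the first colon and store key ↦ stripped value
def pvBStep (d : PySem.Dict (List Char) (List Char)) (line0 : List Char) :
    PySem.Dict (List Char) (List Char) :=
  let line := PySem.Chars.strip line0
  if PySem.Chars.isIn [':'] line then
    match PySem.Chars.splitOnMax line [':'] 1 with
    | [key, value] => d.insert key (PySem.Chars.strip value)
    | _ => d   -- unreachable: split(":", 1) on a line containing ':' yields exactly two parts
  else d

def extract_action_details_alt (text : String) : Option String × Option String :=
  let d := (PySem.Chars.splitOn (PySem.Chars.strip text.toList) ['\n']).foldl pvBStep PySem.Dict.empty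
  ((d.get? ("Action".toList)).map String.ofList, (d.get? ("Action Input".toList)).map String.ofList)

-- ===== PRECONDITION & SPEC =====
def Spec_extract_action_details (text : String) (out : Option String × Option String) : Prop := out = extract_action_details_alt text
instance (text : String) (out : Option String × Option String) : Decidable (Spec_extract_action_details text out) := by unfold Spec_extract_action_details; infer_instance

-- ===== CLAIM (what is proved, stated in full; the proofs are below) =====
def Claim_equal_extract_action_details : Prop := ∀ (text : String), Dom_extract_action_details text → Spec_extract_action_details text (extract_action_details text)

-- ===== LEMMAS AND PROOFS =====

-- split(":", 1) internals: with maxsplit exhausted, go returns the rest as one final piece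
theorem pv_go_m0 (fuel : Nat) (l cur : List Char) (acc : List (List Char)) :
    PySem.Chars.splitOnMax.go [':'] fuel 0 l cur acc = ((cur.reverse ++ l) :: acc).reverse := by
  cases fuel with
  | zero => simp [PySem.Chars.splitOnMax.go]
  | succ f => cases l <;> simp [PySem.Chars.splitOnMax.go]

theorem pv_go_colon : ∀ (k : List Char), ':' ∉ k → ∀ (fuel : Nat) (rest cur : List Char) (acc : List (List Char)), k.length < fuel →
    PySem.Chars.splitOnMax.go [':'] fuel 1 (k ++ ':' :: rest) cur acc
      = acc.reverse ++ [cur.reverse ++ k, rest] := by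
  intro k
  induction k with
  | nil =>
    intro _ fuel rest cur acc hf
    cases fuel with
    | zero => omega
    | succ f =>
      simp only [List.nil_append, PySem.Chars.splitOnMax.go]
      rw [if_neg (by omega), if_pos (by simp [List.isPrefixOf])]
      simp [pv_go_m0]
  | cons c k ih =>
    intro hmem fuel rest cur acc hf
    cases fuel with
    | zero => omega
    | succ f =>
      have hc : c ≠ ':' := fun h => hmem (h ▸ List.mem_cons_self ..)
      have hpre : List.isPrefixOf [':'] (c :: (k ++ ':' :: rest)) = false := by
        simp [List.isPrefixOf]; exact fun h => absurd h.symm hc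
      simp only [List.cons_append, PySem.Chars.splitOnMax.go]
      rw [if_neg (by omega), if_neg (by simp [hpre])]
      rw [ih (fun h => hmem (List.mem_cons_of_mem _ h)) f rest (c :: cur) acc (by simp at hf; omega)]
      simp

theorem pv_splitOnMax_colon (k rest : List Char) (hk : ':' ∉ k) :
    PySem.Chars.splitOnMax (k ++ ':' :: rest) [':'] 1 = [k, rest] := by
  unfold PySem.Chars.splitOnMax
  rw [if_neg (by omega)]
  norm_num
  rw [pv_go_colon k hk _ rest [] [] (by simp)]
  simp

-- a list containing ':' splits as (colon-free prefix) ++ ':' :: rest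
theorem pv_firstColon : ∀ (l : List Char), ':' ∈ l → ∃ k rest, l = k ++ ':' :: rest ∧ ':' ∉ k := by
  intro l
  induction l with
  | nil => simp
  | cons c t ih =>
    intro hmem
    by_cases hc : c = ':'
    · exact ⟨[], t, by simp [hc], by simp⟩
    · have : ':' ∈ t := by
        rcases List.mem_cons.mp hmem with h | h
        · exact absurd h.symm hc
        · exact h
      obtain ⟨k, rest, hEq, hk⟩ := ih this
      exact ⟨c :: k, rest, by simp [hEq], by simp [hk]; exact fun h => hc h.symm⟩

-- '(key ++ ":") is a prefix of the line' exactly identifies the first-colon key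
theorem pv_prefix_iff : ∀ (key : List Char), ':' ∉ key → ∀ (k rest : List Char), ':' ∉ k →
    ((key ++ [':']) <+: (k ++ ':' :: rest) ↔ key = k) := by
  intro key
  induction key with
  | nil =>
    intro _ k rest hk
    cases k with
    | nil => simp
    | cons x k' =>
      simp only [List.nil_append, List.cons_append, List.cons_prefix_cons]
      constructor
      · rintro ⟨h, -⟩; exact absurd (h ▸ List.mem_cons_self ..) hk
      · intro h; exact absurd h (by simp)
  | cons c key' ih =>
    intro hmem k rest hk
    cases k with
    | nil =>
      simp only [List.nil_append, List.cons_append, List.cons_prefix_cons]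
      constructor
      · rintro ⟨h, -⟩; exact absurd (h ▸ List.mem_cons_self ..) hmem
      · intro h; exact absurd h (by simp)
    | cons x k' =>
      simp only [List.cons_append, List.cons_prefix_cons]
      rw [ih (fun h => hmem (List.mem_cons_of_mem _ h)) k' rest (fun h => hk (List.mem_cons_of_mem _ h))]
      constructor
      · rintro ⟨h1, h2⟩; rw [h1, h2]
      · intro h; exact ⟨by injection h, by injection h⟩

-- the one-line crux: A's branch update and B's dict insert agree on both lookups
theorem pv_step (d : PySem.Dict (List Char) (List Char)) (line : List Char) :
    pvAStep ((d.get? ("Action".toList)), (d.get? ("Action Input".toList))) (PySem.Chars.strip line)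
      = ((pvBStep d line).get? ("Action".toList), (pvBStep d line).get? ("Action Input".toList)) := by
  set l := PySem.Chars.strip line with hl
  have hB : pvBStep d line = (if PySem.Chars.isIn [':'] l = true then
      match PySem.Chars.splitOnMax l [':'] 1 with
      | [key, value] => d.insert key (PySem.Chars.strip value)
      | _ => d
    else d) := rfl
  by_cases hc : ':' ∈ l
  · obtain ⟨k, rest, hEq, hk⟩ := pv_firstColon l hc
    have hisin : PySem.Chars.isIn [':'] l = true := ((PySem.Chars.isIn_iff_infix [':'] l).trans (List.singleton_infix_iff ':' l)).mpr hc
    have hsplit : PySem.Chars.splitOnMax l [':'] 1 = [k, rest] := by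
      rw [hEq]; exact pv_splitOnMax_colon k rest hk
    have hA : PySem.Chars.startswith l ("Action:".toList) = true ↔ "Action".toList = k := by
      rw [hEq, PySem.Chars.startswith_iff]
      exact pv_prefix_iff ("Action".toList) (by decide) k rest hk
    have hAI : PySem.Chars.startswith l ("Action Input:".toList) = true ↔ "Action Input".toList = k := by
      rw [hEq, PySem.Chars.startswith_iff]
      exact pv_prefix_iff ("Action Input".toList) (by decide) k rest hk
    rw [hB, if_pos hisin]
    simp only [hsplit]
    by_cases h1 : "Action".toList = k
    · subst h1
      unfold pvAStep
      rw [if_pos (hA.mpr rfl)]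
      rw [PySem.Dict.get?_insert_self, PySem.Dict.get?_insert_of_ne _ _ (by decide)]
      simp [hsplit]
    · by_cases h2 : "Action Input".toList = k
      · subst h2
        unfold pvAStep
        rw [if_neg (by rw [hA]; exact h1), if_pos (hAI.mpr rfl)]
        rw [PySem.Dict.get?_insert_self, PySem.Dict.get?_insert_of_ne _ _ (by decide)]
        simp [hsplit]
      · unfold pvAStep
        rw [if_neg (by rw [hA]; exact h1), if_neg (by rw [hAI]; exact h2)]
        rw [PySem.Dict.get?_insert_of_ne _ _ h1, PySem.Dict.get?_insert_of_ne _ _ h2]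
  · have hisin : PySem.Chars.isIn [':'] l = false := by
      cases h : PySem.Chars.isIn [':'] l
      · rfl
      · exact absurd (((PySem.Chars.isIn_iff_infix [':'] l).trans (List.singleton_infix_iff ':' l)).mp h) hc
    have hA : PySem.Chars.startswith l ("Action:".toList) = false := by
      cases h : PySem.Chars.startswith l ("Action:".toList)
      · rfl
      · exact absurd (List.IsPrefix.mem (by decide) ((PySem.Chars.startswith_iff _ _).mp h)) hc
    have hAI : PySem.Chars.startswith l ("Action Input:".toList) = false := by
      cases h : PySem.Chars.startswith l ("Action Input:".toList)
      · rfl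
      · exact absurd (List.IsPrefix.mem (by decide) ((PySem.Chars.startswith_iff _ _).mp h)) hc
    rw [hB, if_neg (by rw [hisin]; simp)]
    unfold pvAStep
    have hA2 : PySem.Chars.startswith l ['A','c','t','i','o','n',':'] = false := hA
    have hAI2 : PySem.Chars.startswith l ['A','c','t','i','o','n',' ','I','n','p','u','t',':'] = false := hAI
    simp [hA2, hAI2]

-- fold invariant: A's pair state tracks B's dict lookups
theorem pv_main : ∀ (lines : List (List Char)) (d : PySem.Dict (List Char) (List Char)),
    (lines.map PySem.Chars.strip).foldl pvAStep (d.get? ("Action".toList), d.get? ("Action Input".toList))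
      = ((lines.foldl pvBStep d).get? ("Action".toList), (lines.foldl pvBStep d).get? ("Action Input".toList)) := by
  intro lines
  induction lines with
  | nil => intro d; simp
  | cons line t ih =>
    intro d
    simp only [List.map_cons, List.foldl_cons]
    rw [pv_step d line, ih (pvBStep d line)]

-- ===== VERDICT (by name: the statement is the Claim_ definition above) =====
theorem extract_action_details_spec : Claim_equal_extract_action_details := by
  intro text _
  unfold Spec_extract_action_details extract_action_details extract_action_details_alt
  have h := pv_main (PySem.Chars.splitOn (PySem.Chars.strip text.toList) ['\n']) PySem.Dict.empty
  simp only [PySem.Dict.get?_empty] at h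
  simp only [h]
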